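-- pv_equiv track=rewrite | github.com/superchee/CS5421 | projects/project2/project2.py | simplifySelf
-- ===== SOURCE A (Python) =====
-- import copy
--
-- def closure(R, F, S):
--     unused_F = copy.copy(F)
--     S_closure = copy.copy(S)
--
--     while len(unused_F) > 0:
--         bFind = False
--         unused_F_copy = copy.copy(unused_F)
--         for per in unused_F:
--             if set(per[0]).issubset(S_closure): #add the attributes if X in closure
--                 S_closure += list( set(per[1]) - set(S_closure) )
--                 unused_F_copy.remove(per)
--                 bFind = True
--                 break
--         if bFind == False:
--             break #break when no more attributes can be found
--         unused_F = copy.copy(unused_F_copy)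
--     return sorted(S_closure)
--
-- def simplifySelf(R, FD, L_minimal):
--     i = 0
--     while i < len(L_minimal):
--         fd = L_minimal[i]
--         lhs = fd[0]
--         rhs = fd[1]
--         L_temp = copy.copy(L_minimal)
--         L_temp.remove(fd)
--         if (set(rhs).issubset(closure(R,L_temp,lhs))):
--             L_minimal.remove(fd)
--             continue
--         else:
--             i = i + 1
--     return L_minimal
-- ===== SOURCE B (Python) =====
-- def _saturate(F, cl):
--     # level-wise saturation: add the right sides of ALL currently applicable FDs at once
--     new = set()
--     for lhs, rhs in F:
--         if cl.issuperset(lhs):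
--             new |= set(rhs)
--     new -= cl
--     if not new:
--         return cl
--     return _saturate(F, cl | new)
--
-- def simplifySelf(R, FD, L_minimal):
--     kept = []
--     rest = list(L_minimal)
--     while rest:
--         fd = rest.pop(0)
--         if set(fd[1]) <= _saturate(kept + rest, set(fd[0])):
--             continue
--         kept.append(fd)
--     L_minimal[:] = kept
--     return L_minimal
-- ===== Notes on version B (the rewrite author's own statement) =====
-- stated objective: alternative
-- what changed: B replaces A's closure loop (restart the scan over the remaining FDs after each single application, removing used FDs) by a level-wise saturation that adds the right sides of all currently applicable FDs per round, and replaces A's index-mutating while-loop with in-place list.remove by a single left-to-right keep/drop pass over the FD list.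
import Mathlib
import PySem

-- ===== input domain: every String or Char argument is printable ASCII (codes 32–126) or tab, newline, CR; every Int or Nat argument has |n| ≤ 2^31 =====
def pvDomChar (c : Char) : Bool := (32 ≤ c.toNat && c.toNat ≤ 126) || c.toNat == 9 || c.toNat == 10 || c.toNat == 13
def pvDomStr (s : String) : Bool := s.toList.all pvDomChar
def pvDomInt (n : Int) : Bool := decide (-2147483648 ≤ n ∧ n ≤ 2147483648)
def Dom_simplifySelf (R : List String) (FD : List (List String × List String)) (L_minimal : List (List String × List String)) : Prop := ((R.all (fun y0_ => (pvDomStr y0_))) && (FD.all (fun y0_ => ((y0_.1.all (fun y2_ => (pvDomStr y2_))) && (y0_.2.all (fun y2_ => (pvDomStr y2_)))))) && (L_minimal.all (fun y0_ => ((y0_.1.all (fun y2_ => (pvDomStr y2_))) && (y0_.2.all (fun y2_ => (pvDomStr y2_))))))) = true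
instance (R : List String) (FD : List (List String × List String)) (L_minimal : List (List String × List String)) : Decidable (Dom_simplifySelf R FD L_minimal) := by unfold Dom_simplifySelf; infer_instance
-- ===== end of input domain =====

-- B replaces A's one-FD-at-a-time restart-scan closure by a level-wise saturation closure and the
-- index-mutating removal loop by a single left-to-right keep/drop pass (objective: alternative).
-- Both A and B mutate L_minimal in place the same way (B writes the result back via L_minimal[:] = kept);
-- the equivalence proved here is about the return value.

-- ===== PORT A =====
-- set(xs).issubset(ys)
def pvSubset (xs ys : List String) : Bool := xs.all (fun a => ys.contains a)

-- S_closure += list(set(per[1]) - set(S_closure)); Python's iteration order over the set difference is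
-- unspecified — the port appends the same elements in per[1]'s first-occurrence order, which is
-- membership-exact, and closure's result is consumed only through sorted() and subset tests.
def pvClosStep (cl : List String) (fd : List String × List String) : List String :=
  cl ++ PySem.Set.diff (PySem.Set.ofList fd.2) cl

-- the while-loop of closure: each pass scans unused_F for the FIRST applicable FD, applies it,
-- removes it (list.remove = first equal occurrence) and restarts; stops when none applies
def pvClosLoop (unused : List (List String × List String)) (cl : List String) : List String :=
  match h : unused.find? (fun fd => pvSubset fd.1 cl) with
  | none => cl
  | some fd => pvClosLoop (unused.erase fd) (pvClosStep cl fd)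
termination_by unused.length
decreasing_by
  have hm : fd ∈ unused := List.mem_of_find?_eq_some h
  have := List.length_erase_of_mem hm
  have : 0 < unused.length := List.length_pos_of_mem hm
  omega

def pvClosure (R : List String) (F : List (List String × List String)) (S : List String) : List String :=
  PySem.List.sorted (pvClosLoop F S) (fun x => x) false

-- the while-loop of simplifySelf: i stays on removal, advances otherwise
def pvSimplLoop (R : List String) (L : List (List String × List String)) (i : Nat) : List (List String × List String) :=
  if h : i < L.length then
    let fd := L[i]
    if pvSubset fd.2 (pvClosure R (L.erase fd) fd.1) then pvSimplLoop R (L.erase fd) i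
    else pvSimplLoop R L (i + 1)
  else L
termination_by 2 * L.length - i
decreasing_by
  · have hm : L[i] ∈ L := List.getElem_mem h
    have := List.length_erase_of_mem hm
    have : 0 < L.length := List.length_pos_of_mem hm
    omega
  · omega

def simplifySelf (R : List String) (FD : List (List String × List String)) (L_minimal : List (List String × List String)) : List (List String × List String) :=
  pvSimplLoop R L_minimal 0

-- ===== PORT B =====
-- new = ⋃ { set(rhs) | (lhs, rhs) ∈ F, cl ⊇ lhs }  (the for-loop of _saturate)
def pvSatUnion (F : List (List String × List String)) (cl : PySem.Set String) : PySem.Set String :=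
  F.foldl (fun acc fd => if PySem.Set.issuperset cl fd.1 then PySem.Set.update acc fd.2 else acc) PySem.Set.empty

-- new -= cl
def pvSatNew (F : List (List String × List String)) (cl : PySem.Set String) : PySem.Set String :=
  PySem.Set.diff (pvSatUnion F cl) cl

-- needed by pvSaturate's termination proof (cited in decreasing_by)
theorem pvSatUnion_foldl_mem {cl : PySem.Set String} {a : String} :
    ∀ (F : List (List String × List String)) (acc : PySem.Set String),
      a ∈ F.foldl (fun acc fd => if PySem.Set.issuperset cl fd.1 then PySem.Set.update acc fd.2 else acc) acc →
      a ∈ acc ∨ ∃ fd ∈ F, PySem.Set.issuperset cl fd.1 = true ∧ a ∈ fd.2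
  | [], acc, h => Or.inl h
  | fd :: F, acc, h => by
    rcases pvSatUnion_foldl_mem F _ h with h' | ⟨g, hg, hs, ha⟩
    · by_cases hc : PySem.Set.issuperset cl fd.1
      · simp only [hc, if_pos] at h'
        rcases (PySem.Set.mem_update _ _ _).1 h' with h'' | h''
        · exact Or.inl h''
        · exact Or.inr ⟨fd, by simp, hc, h''⟩
      · simp only [hc] at h'
        exact Or.inl h'
    · exact Or.inr ⟨g, by simp [hg], hs, ha⟩

theorem pvSatUnion_mem_flatMap {F : List (List String × List String)} {cl : PySem.Set String} {a : String}
    (h : a ∈ pvSatUnion F cl) : a ∈ F.flatMap Prod.snd := by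
  rcases pvSatUnion_foldl_mem F PySem.Set.empty h with h' | ⟨fd, hfd, _, ha⟩
  · simp [PySem.Set.empty] at h'
  · exact List.mem_flatMap.2 ⟨fd, hfd, ha⟩

-- _saturate: add the right sides of all currently applicable FDs at once, recurse until stable
def pvSaturate (F : List (List String × List String)) (cl : PySem.Set String) : PySem.Set String :=
  let new := pvSatNew F cl
  if hne : new.isEmpty then cl
  else pvSaturate F (PySem.Set.union cl new)
termination_by ((F.flatMap Prod.snd).toFinset \ cl.toFinset).card
decreasing_by
  have hnew : new = pvSatNew F cl := rfl
  rw [hnew] at hne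
  obtain ⟨a, ha⟩ : ∃ a, a ∈ pvSatNew F cl := by
    cases hN : pvSatNew F cl with
    | nil => rw [hN] at hne; simp [List.isEmpty] at hne
    | cons x xs => exact ⟨x, List.mem_cons_self ..⟩
  have hau : a ∈ pvSatUnion F cl ∧ a ∉ cl := (PySem.Set.mem_diff _ _ _).1 ha
  have haf : a ∈ (F.flatMap Prod.snd).toFinset := List.mem_toFinset.2 (pvSatUnion_mem_flatMap hau.1)
  apply Finset.card_lt_card
  rw [Finset.ssubset_def]
  constructor
  · intro x hx
    rw [Finset.mem_sdiff] at hx ⊢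
    refine ⟨hx.1, fun hc => hx.2 ?_⟩
    rw [List.mem_toFinset] at hc ⊢
    exact (PySem.Set.mem_union _ _ _).2 (Or.inl hc)
  · intro hc
    have := hc (Finset.mem_sdiff.2 ⟨haf, fun hm => hau.2 (List.mem_toFinset.1 hm)⟩)
    rw [Finset.mem_sdiff] at this
    exact this.2 (List.mem_toFinset.2 ((PySem.Set.mem_union _ _ _).2 (Or.inr ha)))

def pvPruneLoop (kept rest : List (List String × List String)) : List (List String × List String) :=
  match rest with
  | [] => kept
  | fd :: rs =>
    if PySem.Set.issubset (PySem.Set.ofList fd.2) (pvSaturate (kept ++ rs) (PySem.Set.ofList fd.1)) then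
      pvPruneLoop kept rs
    else
      pvPruneLoop (kept ++ [fd]) rs

def simplifySelf_alt (R : List String) (FD : List (List String × List String)) (L_minimal : List (List String × List String)) : List (List String × List String) :=
  pvPruneLoop [] L_minimal

-- ===== PRECONDITION & SPEC =====
def Spec_simplifySelf (R : List String) (FD : List (List String × List String)) (L_minimal : List (List String × List String)) (out : List (List String × List String)) : Prop := out = simplifySelf_alt R FD L_minimal
instance (R : List String) (FD : List (List String × List String)) (L_minimal : List (List String × List String)) (out : List (List String × List String)) : Decidable (Spec_simplifySelf R FD L_minimal out) := by unfold Spec_simplifySelf; infer_instance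

-- ===== CLAIM (what is proved, stated in full; the proofs are below) =====
def Claim_equal_simplifySelf : Prop := ∀ (R : List String) (FD : List (List String × List String)) (L_minimal : List (List String × List String)), Dom_simplifySelf R FD L_minimal → Spec_simplifySelf R FD L_minimal (simplifySelf R FD L_minimal)

-- ===== LEMMAS AND PROOFS =====

-- a set of attributes is closed under a family of FDs
def FDClosed (F : List (List String × List String)) (C : List String) : Prop :=
  ∀ fd ∈ F, fd.1 ⊆ C → fd.2 ⊆ C

theorem pvSubset_iff (xs ys : List String) : pvSubset xs ys = true ↔ xs ⊆ ys := by
  simp only [pvSubset, List.all_eq_true, List.contains_iff_mem]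
  exact ⟨fun h a ha => h a ha, fun h a ha => h ha⟩

theorem pvClosStep_subset (cl : List String) (fd : List String × List String) :
    cl ⊆ pvClosStep cl fd ∧ fd.2 ⊆ pvClosStep cl fd := by
  constructor
  · exact fun a ha => List.mem_append_left _ ha
  · intro a ha
    by_cases hc : a ∈ cl
    · exact List.mem_append_left _ hc
    · exact List.mem_append_right _
        ((PySem.Set.mem_diff _ _ _).2 ⟨(PySem.Set.mem_ofList _ _).2 ha, hc⟩)

theorem pvClosLoop_grows (unused : List (List String × List String)) (cl : List String) :
    cl ⊆ pvClosLoop unused cl := by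
  fun_induction pvClosLoop unused cl with
  | case1 unused cl h => exact fun _ ha => ha
  | case2 unused cl fd h ih => exact fun a ha => ih ((pvClosStep_subset cl fd).1 ha)

theorem pvClosLoop_closed (F : List (List String × List String)) (unused : List (List String × List String)) (cl : List String) :
    (∀ fd ∈ F, fd ∈ unused ∨ fd.2 ⊆ cl) → FDClosed F (pvClosLoop unused cl) := by
  fun_induction pvClosLoop unused cl with
  | case1 unused cl hfind =>
    intro hinv fd hfd hlhs
    rcases hinv fd hfd with hU | hrhs
    · exact absurd ((pvSubset_iff _ _).2 hlhs) (by simpa using List.find?_eq_none.1 hfind fd hU)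
    · exact hrhs
  | case2 unused cl fd0 hfind ih =>
    intro hinv
    apply ih
    intro fd hfd
    rcases hinv fd hfd with hU | hrhs
    · by_cases he : fd = fd0
      · subst he; exact Or.inr (pvClosStep_subset cl fd).2
      · exact Or.inl ((List.mem_erase_of_ne he).2 hU)
    · exact Or.inr (hrhs.trans (pvClosStep_subset cl fd0).1)

theorem pvClosLoop_minimal (F : List (List String × List String)) (unused : List (List String × List String)) (cl : List String)
    (C : List String) (hC : FDClosed F C) :
    unused ⊆ F → cl ⊆ C → pvClosLoop unused cl ⊆ C := by
  fun_induction pvClosLoop unused cl with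
  | case1 unused cl hfind => exact fun _ hcl => hcl
  | case2 unused cl fd0 hfind ih =>
    intro hU hcl
    have hfd0 : fd0 ∈ unused := List.mem_of_find?_eq_some hfind
    have hsub : pvSubset fd0.1 cl = true := by simpa using List.find?_some hfind
    have hlhs : fd0.1 ⊆ C := fun a ha => hcl ((pvSubset_iff _ _).1 hsub ha)
    have hrhs : fd0.2 ⊆ C := hC fd0 (hU hfd0) hlhs
    apply ih (fun x hx => hU (List.erase_subset hx))
    intro a ha
    rcases List.mem_append.1 ha with h | h
    · exact hcl h
    · exact hrhs ((PySem.Set.mem_ofList _ _).1 ((PySem.Set.mem_diff _ _ _).1 h).1)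

theorem pvSatUnion_mem_intro (cl : PySem.Set String) {fd : List String × List String} {a : String}
    (ha : a ∈ fd.2) (hs : PySem.Set.issuperset cl fd.1 = true) :
    ∀ (F : List (List String × List String)) (acc : PySem.Set String), fd ∈ F →
      a ∈ F.foldl (fun acc fd => if PySem.Set.issuperset cl fd.1 then PySem.Set.update acc fd.2 else acc) acc
  | [], _, hmem => absurd hmem (by simp)
  | g :: F, acc, hmem => by
    have hacc : ∀ (F' : List (List String × List String)) (acc' : PySem.Set String), acc' ⊆
        F'.foldl (fun acc fd => if PySem.Set.issuperset cl fd.1 then PySem.Set.update acc fd.2 else acc) acc' := by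
      intro F'
      induction F' with
      | nil => exact fun _ _ h => h
      | cons g' F'' ih =>
        intro acc' x hx
        apply ih
        by_cases hc : PySem.Set.issuperset cl g'.1
        · simp only [hc, if_pos]
          exact (PySem.Set.mem_update _ _ _).2 (Or.inl hx)
        · simpa [hc] using hx
    rcases List.mem_cons.1 hmem with he | hmem'
    · subst he
      simp only [List.foldl_cons, hs, if_pos]
      exact hacc F _ ((PySem.Set.mem_update _ _ _).2 (Or.inr ha))
    · exact pvSatUnion_mem_intro cl ha hs F _ hmem'

theorem pvSaturate_grows (F : List (List String × List String)) (cl : PySem.Set String) :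
    cl ⊆ pvSaturate F cl := by
  fun_induction pvSaturate F cl with
  | case1 => exact fun _ ha => ha
  | case2 =>
    rename_i cl new hne ih
    exact fun a ha => ih ((PySem.Set.mem_union _ _ _).2 (Or.inl ha))

theorem pvSaturate_closed (F : List (List String × List String)) (cl : PySem.Set String) :
    FDClosed F (pvSaturate F cl) := by
  fun_induction pvSaturate F cl with
  | case1 =>
    rename_i cl new hne
    intro fd hfd hlhs a ha
    by_contra hac
    have hs : PySem.Set.issuperset cl fd.1 = true :=
      (PySem.Set.issuperset_iff _ _).2 (fun x hx => hlhs hx)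
    have hu : a ∈ pvSatUnion F cl := pvSatUnion_mem_intro cl ha hs F PySem.Set.empty hfd
    have hd : a ∈ pvSatNew F cl := (PySem.Set.mem_diff _ _ _).2 ⟨hu, hac⟩
    have hN : pvSatNew F cl = [] := List.isEmpty_iff.1 hne
    rw [hN] at hd
    simp at hd
  | case2 =>
    rename_i cl new hne ih
    exact ih

theorem pvSaturate_minimal (F : List (List String × List String)) (cl : PySem.Set String)
    (C : List String) (hC : FDClosed F C) : cl ⊆ C → pvSaturate F cl ⊆ C := by
  fun_induction pvSaturate F cl with
  | case1 => exact fun hcl => hcl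
  | case2 =>
    rename_i cl new hne ih
    intro hcl
    apply ih
    intro a ha
    rcases (PySem.Set.mem_union _ _ _).1 ha with h | h
    · exact hcl h
    · have h2 := (PySem.Set.mem_diff _ _ _).1 h
      rcases pvSatUnion_foldl_mem F _ h2.1 with h3 | ⟨fd, hfd, hs, ha2⟩
      · simp [PySem.Set.empty] at h3
      · have hlhs : fd.1 ⊆ C := fun x hx => hcl ((PySem.Set.issuperset_iff _ _).1 hs x hx)
        exact hC fd hfd hlhs ha2

theorem clos_equiv (F : List (List String × List String)) (S : List String) (a : String) :
    a ∈ pvClosLoop F S ↔ a ∈ pvSaturate F (PySem.Set.ofList S) := by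
  constructor
  · intro h
    exact pvClosLoop_minimal F F S _ (pvSaturate_closed F (PySem.Set.ofList S))
      (fun x hx => hx)
      (fun x hx => pvSaturate_grows F _ ((PySem.Set.mem_ofList _ _).2 hx)) h
  · intro h
    exact pvSaturate_minimal F (PySem.Set.ofList S) _
      (pvClosLoop_closed F F S (fun fd hfd => Or.inl hfd))
      (fun x hx => pvClosLoop_grows F S ((PySem.Set.mem_ofList _ _).1 hx)) h

theorem test_equiv (R : List String) (F : List (List String × List String)) (fd : List String × List String) :
    pvSubset fd.2 (pvClosure R F fd.1)
      = PySem.Set.issubset (PySem.Set.ofList fd.2) (pvSaturate F (PySem.Set.ofList fd.1)) := by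
  have h : pvSubset fd.2 (pvClosure R F fd.1) = true
      ↔ PySem.Set.issubset (PySem.Set.ofList fd.2) (pvSaturate F (PySem.Set.ofList fd.1)) = true := by
    rw [pvSubset_iff, PySem.Set.issubset_iff]
    constructor
    · intro h x hx
      have := h ((PySem.Set.mem_ofList _ _).1 hx)
      rw [pvClosure, PySem.List.mem_sorted] at this
      exact (clos_equiv F fd.1 x).1 this
    · intro h x hx
      rw [pvClosure, PySem.List.mem_sorted]
      exact (clos_equiv F fd.1 x).2 (h x ((PySem.Set.mem_ofList _ _).2 hx))
  exact Bool.eq_iff_iff.2 (by exact_mod_cast h)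

theorem sat_mono (F F' : List (List String × List String)) (S S' : List String)
    (hF : F' ⊆ F) (hS : S' ⊆ S) :
    pvSaturate F' (PySem.Set.ofList S') ⊆ pvSaturate F (PySem.Set.ofList S) := by
  apply pvSaturate_minimal F' (PySem.Set.ofList S') _
    (fun fd hfd h => pvSaturate_closed F (PySem.Set.ofList S) fd (hF hfd) h)
  intro a ha
  exact pvSaturate_grows F _ ((PySem.Set.mem_ofList _ _).2 (hS ((PySem.Set.mem_ofList _ _).1 ha)))

-- the invariant of A's loop: every kept FD is (still) non-redundant w.r.t. the current list
def KeptInv (kept rest : List (List String × List String)) : Prop :=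
  ∀ g ∈ kept, ¬ (g.2 ⊆ pvSaturate (kept.erase g ++ rest) (PySem.Set.ofList g.1))

theorem main_sim (R : List String) (rest kept : List (List String × List String))
    (hinv : KeptInv kept rest) :
    pvSimplLoop R (kept ++ rest) kept.length = pvPruneLoop kept rest := by
  induction rest generalizing kept with
  | nil =>
    rw [pvSimplLoop, pvPruneLoop]
    simp
  | cons fd rs ih =>
    have hnot : fd ∉ kept := by
      intro hmem
      apply hinv fd hmem
      intro a ha
      have hfd : fd ∈ kept.erase fd ++ fd :: rs := List.mem_append_right _ (List.mem_cons_self ..)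
      exact pvSaturate_closed _ _ fd hfd
        (fun b hb => pvSaturate_grows _ _ ((PySem.Set.mem_ofList _ _).2 hb)) ha
    have hlen : kept.length < (kept ++ fd :: rs).length := by simp
    have hget : (kept ++ fd :: rs)[kept.length] = fd := by
      rw [List.getElem_append_right (le_refl _)]
      simp
    have herase : (kept ++ fd :: rs).erase fd = kept ++ rs := by
      rw [List.erase_append_right _ hnot, List.erase_cons_head]
    rw [pvSimplLoop, pvPruneLoop]
    simp only [hlen, dif_pos, hget, herase]
    rw [test_equiv R (kept ++ rs) fd]
    by_cases hred : PySem.Set.issubset (PySem.Set.ofList fd.2) (pvSaturate (kept ++ rs) (PySem.Set.ofList fd.1)) = true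
    · rw [if_pos hred, if_pos hred]
      apply ih
      intro g hg hsub
      apply hinv g hg
      intro a ha
      apply sat_mono (kept.erase g ++ fd :: rs) (kept.erase g ++ rs) g.1 g.1 ?_ (fun x hx => hx) (hsub ha)
      intro x hx
      rcases List.mem_append.1 hx with h | h
      · exact List.mem_append_left _ h
      · exact List.mem_append_right _ (List.mem_cons_of_mem _ h)
    · rw [if_neg hred, if_neg hred]
      have hsplit : kept ++ fd :: rs = (kept ++ [fd]) ++ rs := by simp
      have hlen2 : kept.length + 1 = (kept ++ [fd]).length := by simp
      rw [hsplit, hlen2]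
      apply ih
      intro g hg
      rcases List.mem_append.1 hg with hgk | hgf
      · have h1 : (kept ++ [fd]).erase g = kept.erase g ++ [fd] := List.erase_append_left _ hgk
        rw [h1, List.append_assoc]
        simpa using hinv g hgk
      · have hgf' : g = fd := by simpa using hgf
        subst hgf'
        have h2 : (kept ++ [g]).erase g = kept := by
          rw [List.erase_append_right _ hnot, List.erase_cons_head, List.append_nil]
        rw [h2]
        intro hsub
        exact hred ((PySem.Set.issubset_iff _ _).2
          (fun a ha => hsub ((PySem.Set.mem_ofList _ _).1 ha)))

-- ===== VERDICT (by name: the statement is the Claim_ definition above) =====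
theorem simplifySelf_spec : Claim_equal_simplifySelf := by
  intro R FD L _
  show _ = _
  have := main_sim R L [] (by intro g hg; simp at hg)
  simpa [simplifySelf, simplifySelf_alt] using this
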